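-- pv_equiv track=rewrite | github.com/dongjokim/LetsMakeBetterConferences | QM/analyze_conference_data.py | count_concepts
-- ===== SOURCE A (Python) =====
-- from collections import Counter
--
-- def count_concepts(titles, concept_dict):
--     """Count occurrences of concepts in talk titles"""
--     counts = Counter()
--
--     for title in titles:
--         title_lower = title.lower()
--         for concept, keywords in concept_dict.items():
--             for keyword in keywords:
--                 if keyword in title_lower:
--                     counts[concept] += 1
--                     break  # Count each concept only once per title
--
--     return counts
-- ===== SOURCE B (Python) =====
-- from collections import Counter
--
-- def count_concepts(titles, concept_dict):
--     """Count occurrences of concepts in talk titles"""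
--     # Build an inverted index once: keyword -> set of concepts that list it,
--     # so each distinct keyword is substring-tested once per title.
--     pos = {concept: i for i, concept in enumerate(concept_dict)}
--     kw_index = {}
--     for concept, keywords in concept_dict.items():
--         for kw in keywords:
--             kw_index.setdefault(kw, set()).add(concept)
--
--     counts = Counter()
--     for title in titles:
--         tl = title.lower()
--         hit = set()
--         for kw, concepts in kw_index.items():
--             if kw in tl:
--                 hit |= concepts
--         # emit in concept_dict order (matches Counter insertion order of A)
--         for concept in sorted(hit, key=pos.__getitem__):
--             counts[concept] += 1
--     return counts
-- ===== Notes on version B (the rewrite author's own statement) =====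
-- stated objective: alternative
-- what changed: B replaces A's per-title scan over every concept's keyword list by an inverted keyword->concepts index built once, so each distinct keyword is substring-tested once per title; matched concepts are then emitted in dict order via a sort on precomputed positions.
import Mathlib
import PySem

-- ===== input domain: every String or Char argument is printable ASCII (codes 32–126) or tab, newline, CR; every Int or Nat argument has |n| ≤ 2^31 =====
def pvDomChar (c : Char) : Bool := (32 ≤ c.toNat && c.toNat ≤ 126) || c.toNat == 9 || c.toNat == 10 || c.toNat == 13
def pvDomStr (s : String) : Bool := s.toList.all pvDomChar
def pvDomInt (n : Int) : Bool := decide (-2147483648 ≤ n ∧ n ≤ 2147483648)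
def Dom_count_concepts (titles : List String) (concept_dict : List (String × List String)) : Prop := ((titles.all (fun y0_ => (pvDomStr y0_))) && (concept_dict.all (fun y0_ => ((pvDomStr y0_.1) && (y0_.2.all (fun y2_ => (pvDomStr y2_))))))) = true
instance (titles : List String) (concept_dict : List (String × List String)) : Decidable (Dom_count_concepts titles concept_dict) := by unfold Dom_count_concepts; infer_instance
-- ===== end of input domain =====

-- B builds an inverted keyword→concepts index once and emits matched concepts sorted by dict
-- position, instead of A's per-title scan of every concept's keyword list (objective: alternative).


-- ===== PORT A =====
def count_concepts (titles : List String) (concept_dict : List (String × List String)) : List (String × Int) :=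
  (titles.foldl (fun counts title =>
      let title_lower := PySem.Str.lower title
      concept_dict.foldl (fun counts ck =>
        -- 'for keyword in keywords: if keyword in title_lower: counts[concept] += 1; break'
        if ck.2.any (fun keyword => PySem.Str.isIn keyword title_lower)
        then counts.modify ck.1 0 (· + 1)
        else counts) counts)
    (PySem.Dict.empty : PySem.Dict String Int)).items

-- ===== PORT B =====
def count_concepts_alt (titles : List String) (concept_dict : List (String × List String)) : List (String × Int) :=
  -- pos = {concept: i for i, concept in enumerate(concept_dict)}
  let pos : PySem.Dict String Int :=
    (PySem.List.enumerate concept_dict).foldl (fun d p => d.insert p.2.1 p.1) PySem.Dict.empty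
  -- for concept, keywords: for kw in keywords: kw_index.setdefault(kw, set()).add(concept)
  let kw_index : PySem.Dict String (PySem.Set String) :=
    concept_dict.foldl (fun d ck =>
      ck.2.foldl (fun d kw => d.modify kw PySem.Set.empty (fun s => PySem.Set.add s ck.1)) d)
      PySem.Dict.empty
  let counts : PySem.Dict String Int :=
    titles.foldl (fun counts title =>
      let tl := PySem.Str.lower title
      let hit : PySem.Set String :=
        kw_index.items.foldl (fun s p => if PySem.Str.isIn p.1 tl then PySem.Set.union s p.2 else s)
          PySem.Set.empty
      -- sorted(hit, key=pos.__getitem__); pos[c] exists for every c ∈ hit, so the getD default is unreachable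
      let ordered := PySem.List.sorted hit (fun c => pos.getD c 0) false
      ordered.foldl (fun counts c => counts.modify c 0 (· + 1)) counts)
      PySem.Dict.empty
  counts.items

-- ===== PRECONDITION & SPEC =====
-- Pre_ requires distinct concept keys: an association list with duplicate keys does not represent
-- any Python dict (Python's dict construction collapses duplicates before A or B ever runs),
-- so behaviour of the ports there is an artifact of the list encoding.
def Pre_count_concepts (titles : List String) (concept_dict : List (String × List String)) : Prop :=
  (concept_dict.map Prod.fst).Nodup
instance (titles : List String) (concept_dict : List (String × List String)) : Decidable (Pre_count_concepts titles concept_dict) := by unfold Pre_count_concepts; infer_instance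

def pvWitness_count_concepts : List String × (List (String × List String)) :=
  (["Quark Matter", "flow at RHIC"], [("flow", ["flow", "v2"]), ("quark", ["quark"])])

def Spec_count_concepts (titles : List String) (concept_dict : List (String × List String)) (out : List (String × Int)) : Prop := out = count_concepts_alt titles concept_dict
instance (titles : List String) (concept_dict : List (String × List String)) (out : List (String × Int)) : Decidable (Spec_count_concepts titles concept_dict out) := by unfold Spec_count_concepts; infer_instance

-- ===== CLAIM (what is proved, stated in full; the proofs are below) =====
def Claim_equal_count_concepts : Prop := ∀ (titles : List String) (concept_dict : List (String × List String)), Dom_count_concepts titles concept_dict → Pre_count_concepts titles concept_dict → Spec_count_concepts titles concept_dict (count_concepts titles concept_dict)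

-- ===== LEMMAS AND PROOFS =====

-- The three intermediate values B computes, as standalone definitions (proof helpers only).
def pvPos (cd : List (String × List String)) : PySem.Dict String Int :=
  (PySem.List.enumerate cd).foldl (fun d p => d.insert p.2.1 p.1) PySem.Dict.empty

def pvKwIx (cd : List (String × List String)) : PySem.Dict String (PySem.Set String) :=
  cd.foldl (fun d ck =>
      ck.2.foldl (fun d kw => d.modify kw PySem.Set.empty (fun s => PySem.Set.add s ck.1)) d)
    PySem.Dict.empty

def pvHit (cd : List (String × List String)) (tl : String) : PySem.Set String :=
  (pvKwIx cd).items.foldl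
    (fun s p => if PySem.Str.isIn p.1 tl then PySem.Set.union s p.2 else s) PySem.Set.empty

lemma alt_eq (titles : List String) (cd : List (String × List String)) :
    count_concepts_alt titles cd =
      (titles.foldl (fun counts title =>
        (PySem.List.sorted (pvHit cd (PySem.Str.lower title)) (fun c => (pvPos cd).getD c 0) false).foldl
          (fun counts c => counts.modify c 0 (· + 1)) counts)
        (PySem.Dict.empty : PySem.Dict String Int)).items := rfl

-- pos is the dict {concept: index}: its items are exactly (key, index) in concept_dict order.
lemma pos_items (cd : List (String × List String)) (hnd : (cd.map Prod.fst).Nodup) :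
    (pvPos cd).items = (PySem.List.enumerate cd).map (fun p => (p.2.1, p.1)) := by
  unfold pvPos
  have hmap : (PySem.List.enumerate cd).map (fun p => p.2.1) = cd.map Prod.fst := by
    rw [show (fun (p : Int × String × List String) => p.2.1) = Prod.fst ∘ (·.2) from rfl,
       ← List.map_map, PySem.List.map_snd_enumerate]
  rw [PySem.Dict.items_foldl_insert_fresh]
  · simp [PySem.Dict.empty]
  · intro a _; exact PySem.Dict.contains_empty _
  · rw [hmap]; exact hnd

lemma pos_getD (cd : List (String × List String)) (hnd : (cd.map Prod.fst).Nodup)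
    (i : Nat) (hi : i < cd.length) : (pvPos cd).getD (cd[i].1) 0 = (i : Int) := by
  have hmem : ((cd[i].1, (i : Int))) ∈ (pvPos cd).items := by
    rw [pos_items cd hnd]
    refine List.mem_map.2 ⟨((i : Int), cd[i]), ?_, rfl⟩
    rw [PySem.List.mem_enumerate_iff]
    exact ⟨i, hi, by simp⟩
  have hkeys : (pvPos cd).keys.Nodup := by
    have : (pvPos cd).keys = (pvPos cd).items.map (·.1) := rfl
    rw [this, pos_items cd hnd, List.map_map]
    have : ((fun (p : String × Int) => p.1) ∘ fun (p : Int × String × List String) => (p.2.1, p.1))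
        = Prod.fst ∘ (·.2) := rfl
    rw [this, ← List.map_map, PySem.List.map_snd_enumerate]
    exact hnd
  exact PySem.Dict.getD_of_mem_items _ hmem hkeys 0

-- concept_dict is strictly increasing under the pos key.
lemma cd_pairwise_pos (cd : List (String × List String)) (hnd : (cd.map Prod.fst).Nodup) :
    cd.Pairwise (fun x y => (pvPos cd).getD x.1 0 < (pvPos cd).getD y.1 0) := by
  rw [List.pairwise_iff_getElem]
  intro i j hi hj hij
  rw [pos_getD cd hnd i hi, pos_getD cd hnd j hj]
  exact_mod_cast hij

-- membership in the inner keyword loop of the index construction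
lemma mem_getD_inner (kws : List String) (c0 : String) (d : PySem.Dict String (PySem.Set String))
    (kw c : String) :
    c ∈ (kws.foldl (fun d k => d.modify k PySem.Set.empty (fun s => PySem.Set.add s c0)) d).getD kw PySem.Set.empty
      ↔ c ∈ d.getD kw PySem.Set.empty ∨ (kw ∈ kws ∧ c = c0) := by
  induction kws generalizing d with
  | nil => simp
  | cons k rest ih =>
    rw [List.foldl_cons, ih]
    rw [PySem.Dict.getD_modify]
    by_cases hk : kw = k
    · subst hk
      simp [PySem.Set.mem_add]
      tauto
    · simp only [if_neg hk, List.mem_cons]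
      tauto

lemma mem_getD_kwIxAux (cd : List (String × List String)) (d : PySem.Dict String (PySem.Set String))
    (kw c : String) :
    c ∈ (cd.foldl (fun d ck =>
        ck.2.foldl (fun d k => d.modify k PySem.Set.empty (fun s => PySem.Set.add s ck.1)) d) d).getD kw PySem.Set.empty
      ↔ c ∈ d.getD kw PySem.Set.empty ∨ ∃ ck ∈ cd, ck.1 = c ∧ kw ∈ ck.2 := by
  induction cd generalizing d with
  | nil => simp
  | cons ck rest ih =>
    rw [List.foldl_cons, ih, mem_getD_inner]
    constructor
    · rintro ((h | ⟨hkw, rfl⟩) | h)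
      · exact Or.inl h
      · exact Or.inr ⟨ck, List.mem_cons_self .., rfl, hkw⟩
      · obtain ⟨p, hp, h1, h2⟩ := h; exact Or.inr ⟨p, List.mem_cons_of_mem _ hp, h1, h2⟩
    · rintro (h | ⟨p, hp, h1, h2⟩)
      · exact Or.inl (Or.inl h)
      · rcases List.mem_cons.1 hp with rfl | hp'
        · exact Or.inl (Or.inr ⟨h2, h1.symm⟩)
        · exact Or.inr ⟨p, hp', h1, h2⟩

-- kw_index maps kw to exactly the concepts listing kw.
lemma mem_getD_kwIx (cd : List (String × List String)) (kw c : String) :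
    c ∈ (pvKwIx cd).getD kw PySem.Set.empty ↔ ∃ ck ∈ cd, ck.1 = c ∧ kw ∈ ck.2 := by
  unfold pvKwIx
  rw [mem_getD_kwIxAux]
  simp [PySem.Dict.getD_empty, PySem.Set.empty]

lemma nodup_keys_kwIx (cd : List (String × List String)) : (pvKwIx cd).keys.Nodup := by
  unfold pvKwIx
  suffices h : ∀ d : PySem.Dict String (PySem.Set String), d.keys.Nodup →
      (cd.foldl (fun d ck =>
        ck.2.foldl (fun d k => d.modify k PySem.Set.empty (fun s => PySem.Set.add s ck.1)) d) d).keys.Nodup by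
    exact h _ (by simp [PySem.Dict.empty, PySem.Dict.keys])
  induction cd with
  | nil => intro d hd; simpa using hd
  | cons ck rest ih =>
    intro d hd
    rw [List.foldl_cons]
    exact ih _ (PySem.Dict.nodup_keys_foldl_modify_key ck.2 (fun k => k) PySem.Set.empty
      (fun _ _ s => PySem.Set.add s ck.1) d hd)

lemma mem_foldl_union (l : List (String × PySem.Set String)) (tl : String)
    (s : PySem.Set String) (c : String) :
    c ∈ l.foldl (fun s p => if PySem.Str.isIn p.1 tl then PySem.Set.union s p.2 else s) s
      ↔ c ∈ s ∨ ∃ p ∈ l, PySem.Str.isIn p.1 tl = true ∧ c ∈ p.2 := by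
  induction l generalizing s with
  | nil => simp
  | cons p rest ih =>
    rw [List.foldl_cons, ih]
    by_cases hp : PySem.Str.isIn p.1 tl
    · rw [if_pos hp]
      simp only [PySem.Set.mem_union, List.mem_cons]
      constructor
      · rintro ((h | h) | ⟨q, hq, h1, h2⟩)
        · exact Or.inl h
        · exact Or.inr ⟨p, Or.inl rfl, hp, h⟩
        · exact Or.inr ⟨q, Or.inr hq, h1, h2⟩
      · rintro (h | ⟨q, (rfl | hq), h1, h2⟩)
        · exact Or.inl (Or.inl h)
        · exact Or.inl (Or.inr h2)
        · exact Or.inr ⟨q, hq, h1, h2⟩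
    · rw [if_neg hp]
      simp only [List.mem_cons]
      constructor
      · rintro (h | ⟨q, hq, h1, h2⟩)
        · exact Or.inl h
        · exact Or.inr ⟨q, Or.inr hq, h1, h2⟩
      · rintro (h | ⟨q, (rfl | hq), h1, h2⟩)
        · exact Or.inl h
        · exact absurd h1 hp
        · exact Or.inr ⟨q, hq, h1, h2⟩

lemma nodup_foldl_union (l : List (String × PySem.Set String)) (tl : String)
    (s : PySem.Set String) (hs : s.Nodup) :
    (l.foldl (fun s p => if PySem.Str.isIn p.1 tl then PySem.Set.union s p.2 else s) s).Nodup := by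
  induction l generalizing s with
  | nil => exact hs
  | cons p rest ih =>
    rw [List.foldl_cons]
    by_cases hp : PySem.Str.isIn p.1 tl
    · rw [if_pos hp]; exact ih _ (PySem.Set.nodup_union s p.2 hs)
    · rw [if_neg hp]; exact ih _ hs

-- the hit set of a title holds exactly the concepts with a matching keyword
lemma mem_pvHit (cd : List (String × List String)) (tl : String) (c : String) :
    c ∈ pvHit cd tl ↔ ∃ ck ∈ cd, ck.1 = c ∧ ∃ kw ∈ ck.2, PySem.Str.isIn kw tl = true := by
  unfold pvHit
  rw [mem_foldl_union]
  have hbridge : (∃ p ∈ (pvKwIx cd).items, PySem.Str.isIn p.1 tl = true ∧ c ∈ p.2)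
      ↔ ∃ kw, PySem.Str.isIn kw tl = true ∧ c ∈ (pvKwIx cd).getD kw PySem.Set.empty := by
    constructor
    · rintro ⟨p, hp, h1, h2⟩
      exact ⟨p.1, h1, by rw [PySem.Dict.getD_of_mem_items _ hp (nodup_keys_kwIx cd)]; exact h2⟩
    · rintro ⟨kw, h1, h2⟩
      rw [PySem.Dict.getD_eq_get?_getD] at h2
      cases hg : (pvKwIx cd).get? kw with
      | none => rw [hg] at h2; simp [PySem.Set.empty] at h2
      | some sset =>
        rw [hg] at h2
        exact ⟨(kw, sset), PySem.Dict.mem_items_of_get?_eq_some _ hg, h1, h2⟩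
  rw [hbridge]
  simp only [PySem.Set.empty, List.not_mem_nil, false_or]
  constructor
  · rintro ⟨kw, h1, h2⟩
    obtain ⟨ck, hck, rfl, hkw⟩ := (mem_getD_kwIx cd kw c).1 h2
    exact ⟨ck, hck, rfl, kw, hkw, h1⟩
  · rintro ⟨ck, hck, rfl, kw, hkw, h1⟩
    exact ⟨kw, h1, (mem_getD_kwIx cd kw ck.1).2 ⟨ck, hck, rfl, hkw⟩⟩

-- sorting the hit set by pos yields exactly the hit concepts in concept_dict order
lemma hit_sorted_eq (cd : List (String × List String)) (hnd : (cd.map Prod.fst).Nodup)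
    (tl : String) :
    PySem.List.sorted (pvHit cd tl) (fun c => (pvPos cd).getD c 0) false
      = (cd.filter (fun ck => ck.2.any (fun kw => PySem.Str.isIn kw tl))).map Prod.fst := by
  apply PySem.List.sorted_eq_of_perm_of_pairwise_lt
  · apply (List.perm_ext_iff_of_nodup ?_ ?_).2
    · intro c
      simp only [List.mem_map, List.mem_filter, List.any_eq_true]
      rw [mem_pvHit]
      tauto
    · exact hnd.sublist (List.filter_sublist.map Prod.fst)
    · exact nodup_foldl_union _ tl [] List.nodup_nil
  · rw [List.pairwise_map]
    exact (cd_pairwise_pos cd hnd).filter _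

-- ===== VERDICT (by name: the statement is the Claim_ definition above) =====
theorem count_concepts_spec : Claim_equal_count_concepts := by
  intro titles cd _ hpre
  unfold Pre_count_concepts at hpre
  unfold Spec_count_concepts
  rw [alt_eq]
  unfold count_concepts
  congr 1
  apply List.foldl_ext
  intro counts title _
  rw [hit_sorted_eq cd hpre (PySem.Str.lower title), List.foldl_map, List.foldl_filter]
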